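-- pv_equiv track=rewrite | github.com/toki866/ApexTraderAI | tools/check_leak_alignment_v3.py | _detect_pos_col
-- ===== SOURCE A (Python) =====
-- from typing import List, Optional, Tuple
--
-- def _detect_pos_col(cols: List[str]) -> Optional[str]:
--     for c in cols:
--         if c.lower() in ("pos", "position", "pos_ratio", "ratio", "weight", "w"):
--             return c
--     for c in cols:
--         if "pos" in c.lower():
--             return c
--     return None
-- ===== SOURCE B (Python) =====
-- from typing import List, Optional
--
-- def _detect_pos_col(cols: List[str]) -> Optional[str]:
--     fallback = None
--     for c in cols:
--         lc = c.lower()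
--         if lc in ("pos", "position", "pos_ratio", "ratio", "weight", "w"):
--             return c
--         if fallback is None and "pos" in lc:
--             fallback = c
--     return fallback
-- ===== Notes on version B (the rewrite author's own statement) =====
-- stated objective: alternative
-- what changed: A's two sequential scans (exact-keyword pass, then substring pass) are fused into one pass that returns immediately on an exact keyword and records the first substring match in a fallback variable returned after the loop.
import Mathlib
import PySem

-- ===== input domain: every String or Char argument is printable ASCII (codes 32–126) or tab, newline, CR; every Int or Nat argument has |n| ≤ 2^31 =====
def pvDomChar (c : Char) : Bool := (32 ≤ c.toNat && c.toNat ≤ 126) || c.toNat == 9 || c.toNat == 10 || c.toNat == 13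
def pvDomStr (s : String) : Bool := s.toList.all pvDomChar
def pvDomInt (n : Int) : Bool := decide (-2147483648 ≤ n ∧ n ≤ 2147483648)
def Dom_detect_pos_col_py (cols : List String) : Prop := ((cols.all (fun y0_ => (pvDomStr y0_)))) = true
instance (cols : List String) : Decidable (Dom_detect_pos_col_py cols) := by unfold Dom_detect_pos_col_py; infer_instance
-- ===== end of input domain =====

-- B fuses A's two scans into one pass with a fallback variable (objective: alternative decomposition, same cost).

-- ===== PORT A =====
def pvKeywords : List String := ["pos", "position", "pos_ratio", "ratio", "weight", "w"]

-- first loop of A: exact keyword match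
def pvAPass1 (cols : List String) : Option String :=
  match cols with
  | [] => none
  | c :: cs => if pvKeywords.contains (PySem.Str.lower c) then some c else pvAPass1 cs

-- second loop of A: "pos" substring match
def pvAPass2 (cols : List String) : Option String :=
  match cols with
  | [] => none
  | c :: cs => if PySem.Str.isIn "pos" (PySem.Str.lower c) then some c else pvAPass2 cs

def detect_pos_col_py (cols : List String) : Option String :=
  match pvAPass1 cols with
  | some c => some c
  | none => pvAPass2 cols

-- ===== PORT B =====
def pvBLoop (cols : List String) (fallback : Option String) : Option String :=
  match cols with
  | [] => fallback
  | c :: cs =>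
    let lc := PySem.Str.lower c
    if pvKeywords.contains lc then some c
    else pvBLoop cs (if fallback.isNone && PySem.Str.isIn "pos" lc then some c else fallback)

def detect_pos_col_py_alt (cols : List String) : Option String :=
  pvBLoop cols none

-- ===== PRECONDITION & SPEC =====
def Spec_detect_pos_col_py (cols : List String) (out : Option String) : Prop := out = detect_pos_col_py_alt cols
instance (cols : List String) (out : Option String) : Decidable (Spec_detect_pos_col_py cols out) := by unfold Spec_detect_pos_col_py; infer_instance

-- ===== CLAIM (what is proved, stated in full; the proofs are below) =====
def Claim_equal_detect_pos_col_py : Prop := ∀ (cols : List String), Dom_detect_pos_col_py cols → Spec_detect_pos_col_py cols (detect_pos_col_py cols)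

-- ===== LEMMAS AND PROOFS =====

-- B's single loop with fallback fb equals: A's first pass, else fb, else A's second pass.
theorem pvBLoop_eq (cols : List String) (fb : Option String) :
    pvBLoop cols fb =
      match pvAPass1 cols with
      | some c => some c
      | none => match fb with
                | some x => some x
                | none => pvAPass2 cols := by
  induction cols generalizing fb with
  | nil => cases fb <;> simp [pvBLoop, pvAPass1, pvAPass2]
  | cons c cs ih =>
    simp only [pvBLoop, pvAPass1, pvAPass2]
    by_cases hk : PySem.Str.lower c ∈ pvKeywords
    · simp [hk]
    · simp only [List.contains_eq_mem, hk, decide_false, Bool.false_eq_true, if_false]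
      rw [ih]
      by_cases hs : PySem.Chars.isIn ['p', 'o', 's'] (PySem.Chars.lower c.toList) = true
      · cases fb <;> cases h1 : pvAPass1 cs <;> simp [PySem.Str.isIn, hs]
      · cases fb <;> cases h1 : pvAPass1 cs <;> simp [PySem.Str.isIn, hs]

-- ===== VERDICT (by name: the statement is the Claim_ definition above) =====
theorem detect_pos_col_py_spec : Claim_equal_detect_pos_col_py := by
  intro cols _
  unfold Spec_detect_pos_col_py detect_pos_col_py detect_pos_col_py_alt
  rw [pvBLoop_eq]
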